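-- pv_equiv track=rewrite | github.com/bloodyawei/test | seeJoker.py | see_joker
-- ===== SOURCE A (Python) =====
-- def see_joker(people_line):
--     who_see_joker = []
--     highest = max(people_line)
--     highest_index = people_line.index(highest)
--     who_see_joker.append(highest)
--     while highest_index < len(people_line) - 1:
--         other_height = max(people_line[highest_index + 1:])
--         other_index = people_line[highest_index + 1:].index(other_height)
--         if other_height != highest:
--             who_see_joker.append(other_height)
--         highest = other_height
--         highest_index = highest_index + other_index + 1
--     return who_see_joker
-- ===== SOURCE B (Python) =====
-- def see_joker(people_line):
--     # single right-to-left pass: record strictly-new running maxima, then reverse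
--     records = []
--     m = None
--     for h in reversed(people_line):
--         if m is None or h > m:
--             records.append(h)
--             m = h
--     records.reverse()
--     return records
-- ===== Notes on version B (the rewrite author's own statement) =====
-- stated objective: faster
-- what changed: Replaced the repeated max()+index() rescans of the remaining suffix with a single right-to-left pass that records strictly increasing running maxima and reverses them.
-- outside the precondition, e.g. on see_joker([]): A raises ValueError, B returns []
import Mathlib
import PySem

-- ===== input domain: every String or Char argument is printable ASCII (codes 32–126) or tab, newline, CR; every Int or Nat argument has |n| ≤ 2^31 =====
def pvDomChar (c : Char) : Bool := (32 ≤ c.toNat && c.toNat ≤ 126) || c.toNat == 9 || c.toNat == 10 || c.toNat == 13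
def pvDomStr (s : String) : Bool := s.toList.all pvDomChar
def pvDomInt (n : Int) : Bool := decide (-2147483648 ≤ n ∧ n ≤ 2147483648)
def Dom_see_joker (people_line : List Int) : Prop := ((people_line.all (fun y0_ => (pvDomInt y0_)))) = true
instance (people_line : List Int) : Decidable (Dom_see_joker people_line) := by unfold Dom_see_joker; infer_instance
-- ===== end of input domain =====

-- B replaces A's repeated max()+index() rescans of the remaining suffix by one right-to-left
-- pass recording strictly-new running maxima (objective: faster, O(n) vs O(n^2)).

-- ===== PORT A =====
-- the while loop of A, as recursion on the remaining suffix people_line[highest_index+1:]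
-- (a slice from a nonnegative index is List.drop, PySem.List.slice_from_natCast)
def see_joker_loop (highest : Int) (rest : List Int) : List Int :=
  match hm : PySem.List.max? rest (fun y => y) with
  | none => []   -- highest_index = len - 1 : loop guard false
  | some other_height =>
    (if other_height ≠ highest then [other_height] else []) ++
      see_joker_loop other_height
        (rest.drop ((PySem.List.index? rest other_height).getD 0 + 1))
termination_by rest.length
decreasing_by
  have hne : rest ≠ [] := by
    intro h; subst h; simp [PySem.List.max?] at hm
  have h1 : 0 < rest.length := List.length_pos_iff.mpr hne
  simp [List.length_drop]; omega

def see_joker (people_line : List Int) : List Int :=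
  match PySem.List.max? people_line (fun y => y) with
  | none => []   -- Python: max([]) raises ValueError; excluded by Pre_see_joker
  | some highest =>
    highest :: see_joker_loop highest
      (people_line.drop ((PySem.List.index? people_line highest).getD 0 + 1))

-- ===== PORT B =====
def see_joker_alt (people_line : List Int) : List Int :=
  let st := people_line.reverse.foldl
    (fun (st : List Int × Option Int) h =>
      match st.2 with
      | none => (st.1 ++ [h], some h)
      | some m => if h > m then (st.1 ++ [h], some h) else st)
    ([], none)
  st.1.reverse

-- ===== PRECONDITION & SPEC =====
-- A raises ValueError on the empty list (max of an empty sequence); excluded here.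
def Pre_see_joker (people_line : List Int) : Prop := people_line ≠ []
instance (people_line : List Int) : Decidable (Pre_see_joker people_line) := by unfold Pre_see_joker; infer_instance
def pvWitness_see_joker : List Int := ([3, 1, 3, 2])

def Spec_see_joker (people_line : List Int) (out : List Int) : Prop := out = see_joker_alt people_line
instance (people_line : List Int) (out : List Int) : Decidable (Spec_see_joker people_line out) := by unfold Spec_see_joker; infer_instance

-- ===== CLAIM (what is proved, stated in full; the proofs are below) =====
def Claim_equal_see_joker : Prop := ∀ (people_line : List Int), Dom_see_joker people_line → Pre_see_joker people_line → Spec_see_joker people_line (see_joker people_line)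

-- ===== LEMMAS AND PROOFS =====

-- canonical value: the strictly-decreasing list of suffix-maximum records
def recs : List Int → List Int
  | [] => []
  | h :: t => if t.all (fun x => decide (x < h)) then h :: recs t else recs t

theorem mem_recs {x : Int} : ∀ {l : List Int}, x ∈ recs l → x ∈ l := by
  intro l
  induction l with
  | nil => simp [recs]
  | cons h t ih =>
    simp only [recs]
    split
    · intro hx
      rcases List.mem_cons.mp hx with h1 | h1
      · simp [h1]
      · exact List.mem_cons_of_mem _ (ih h1)
    · intro hx; exact List.mem_cons_of_mem _ (ih hx)

-- running maximum, as B maintains it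
def maxO : List Int → Option Int
  | [] => none
  | h :: t => match maxO t with | none => some h | some m => some (max h m)

theorem maxO_eq_none_iff (l : List Int) : maxO l = none ↔ l = [] := by
  cases l <;> simp [maxO] <;> split <;> simp

theorem maxO_isMax : ∀ {l : List Int} {m : Int}, maxO l = some m → ∀ x ∈ l, x ≤ m := by
  intro l
  induction l with
  | nil => simp [maxO]
  | cons h t ih =>
    intro m hm x hx
    simp only [maxO] at hm
    rcases List.mem_cons.mp hx with h1 | h1
    · subst h1
      cases ht : maxO t
      · rw [ht] at hm; simp_all
      · rw [ht] at hm; simp_all; omega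
    · cases ht : maxO t with
      | none => rw [(maxO_eq_none_iff t).mp ht] at h1; simp at h1
      | some m' =>
        rw [ht] at hm
        have := ih ht x h1
        simp at hm; omega

theorem maxO_mem : ∀ {l : List Int} {m : Int}, maxO l = some m → m ∈ l := by
  intro l
  induction l with
  | nil => simp [maxO]
  | cons h t ih =>
    intro m hm
    simp only [maxO] at hm
    cases ht : maxO t with
    | none => rw [ht] at hm; simp at hm; simp [hm]
    | some m' =>
      rw [ht] at hm
      simp at hm
      rcases max_choice h m' with hc | hc <;> rw [hc] at hm
      · simp [hm]
      · exact List.mem_cons_of_mem _ (hm ▸ ih ht)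

theorem all_lt_iff_maxO_lt {t : List Int} {m h : Int} (hm : maxO t = some m) :
    (t.all (fun x => decide (x < h)) = true) ↔ m < h := by
  constructor
  · intro ha
    have := List.all_eq_true.mp ha m (maxO_mem hm)
    simpa using this
  · intro hlt
    exact List.all_eq_true.mpr fun x hx => by
      have := maxO_isMax hm x hx; simp; omega

-- B's fold computes ((recs l).reverse, maxO l)
theorem fold_eq_recs (l : List Int) :
    l.foldr (fun h (st : List Int × Option Int) =>
      match st.2 with
      | none => (st.1 ++ [h], some h)
      | some m => if h > m then (st.1 ++ [h], some h) else st) ([], none)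
    = ((recs l).reverse, maxO l) := by
  induction l with
  | nil => simp [recs, maxO]
  | cons h t ih =>
    simp only [List.foldr_cons, ih]
    cases ht : maxO t with
    | none =>
      have : t = [] := (maxO_eq_none_iff t).mp ht
      subst this
      simp [recs, maxO]
    | some m =>
      simp only [recs, maxO, ht]
      by_cases hlt : m < h
      · rw [if_pos ((all_lt_iff_maxO_lt ht).mpr hlt)]
        simp [hlt, max_eq_left (le_of_lt hlt)]
      · rw [if_neg (show ¬ (h > m) from hlt)]
        rw [if_neg (show ¬ ((t.all fun x => decide (x < h)) = true) from by
          rw [all_lt_iff_maxO_lt ht]; exact hlt)]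
        simp [max_eq_right (by omega : h ≤ m)]

theorem alt_eq_recs (l : List Int) : see_joker_alt l = recs l := by
  unfold see_joker_alt
  rw [List.foldl_reverse]
  simp only [fold_eq_recs, List.reverse_reverse]

-- head/uniqueness of the maximal record
theorem recs_head_max : ∀ {l : List Int} {m : Int}, m ∈ l → (∀ x ∈ l, x ≤ m) →
    recs l = m :: (recs l).filter (fun x => decide (x ≠ m)) := by
  intro l
  induction l with
  | nil => simp
  | cons h t ih =>
    intro m hmem hub
    by_cases ht : t.all (fun x => decide (x < h)) = true
    · have hall := List.all_eq_true.mp ht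
      have hm : m = h := by
        rcases List.mem_cons.mp hmem with h1 | h1
        · exact h1
        · have := hall m h1
          have hh := hub h (by simp)
          simp at this; omega
      subst hm
      simp only [recs, ht, if_true]
      have hkeep : (recs t).filter (fun x => !decide (x = m)) = recs t := by
        apply List.filter_eq_self.mpr
        intro x hx
        have := hall x (mem_recs hx)
        simp at this ⊢; omega
      simp [List.filter_cons, hkeep]
    · simp only [recs, ht, if_false]
      have ⟨x, hx, hxh⟩ : ∃ x ∈ t, ¬ (x < h) := by
        by_contra hc
        push_neg at hc
        exact ht (List.all_eq_true.mpr fun y hy => by simp [hc y hy])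
      have hmt : m ∈ t := by
        rcases List.mem_cons.mp hmem with h1 | h1
        · subst h1
          have hxm := hub x (List.mem_cons_of_mem _ hx)
          have : x = m := by omega
          exact this ▸ hx
        · exact h1
      exact ih hmt (fun y hy => hub y (List.mem_cons_of_mem _ hy))

-- dropping up to (and including) the first occurrence of the maximum keeps the lower records
theorem recs_filter_drop : ∀ (l : List Int) (m : Int) (i : Nat),
    (∀ x ∈ l, x ≤ m) → PySem.List.index? l m = some i →
    (recs l).filter (fun x => decide (x ≠ m)) = (recs (l.drop (i + 1))).filter (fun x => decide (x ≠ m)) := by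
  intro l
  induction l with
  | nil => simp [PySem.List.index?_eq_idxOf?]
  | cons h t ih =>
    intro m i hub hidx
    by_cases hhm : h = m
    · subst hhm
      rw [PySem.List.index?_cons_self] at hidx
      have : i = 0 := by simpa using hidx.symm
      subst this
      simp only [List.drop_succ_cons, List.drop_zero]
      by_cases ht : t.all (fun x => decide (x < h)) = true
      · simp [recs, ht]
      · simp [recs, ht]
    · rw [PySem.List.index?_cons_of_ne t hhm] at hidx
      cases hj : PySem.List.index? t m with
      | none => rw [hj] at hidx; simp at hidx
      | some j =>
        rw [hj] at hidx
        simp at hidx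
        subst hidx
        have hmt : m ∈ t := (PySem.List.index?_isSome_iff t m).mp (by rw [hj]; rfl)
        have hnall : ¬ (t.all (fun x => decide (x < h)) = true) := by
          intro hc
          have := List.all_eq_true.mp hc m hmt
          have hh := hub h (by simp)
          simp at this; omega
        simp only [recs, hnall, if_false, List.drop_succ_cons]
        exact ih m j (fun y hy => hub y (List.mem_cons_of_mem _ hy)) hj

-- A's loop computes the records below `highest`
theorem loop_eq_recs : ∀ (n : Nat) (l : List Int) (highest : Int), l.length ≤ n →
    (∀ x ∈ l, x ≤ highest) →
    see_joker_loop highest l = (recs l).filter (fun x => decide (x ≠ highest)) := by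
  intro n
  induction n with
  | zero =>
    intro l highest hn _
    have : l = [] := List.length_eq_zero_iff.mp (Nat.le_zero.mp hn)
    subst this
    rw [see_joker_loop]
    simp [PySem.List.max?, recs]
  | succ n ih =>
    intro l highest hn hub
    cases hm : PySem.List.max? l (fun y => y) with
    | none =>
      have : l = [] := (PySem.List.max?_eq_none_iff l _).mp hm
      subst this
      rw [see_joker_loop]
      simp [PySem.List.max?, recs]
    | some m =>
      have hmem : m ∈ l := PySem.List.max?_mem hm
      have hmax : ∀ x ∈ l, x ≤ m := fun x hx => PySem.List.max?_isMax hm x hx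
      cases hj : PySem.List.index? l m with
      | none => exact absurd (((PySem.List.index?_isSome_iff l m).mpr hmem)) (by rw [hj]; simp)
      | some j =>
        rw [see_joker_loop]
        split
        · rename_i heq; rw [hm] at heq; exact absurd heq (by simp)
        rename_i oh heq
        rw [hm] at heq
        cases heq
        simp only [hj, Option.getD_some]
        have hlen : (l.drop (j + 1)).length ≤ n := by
          have h0 : 0 < l.length := List.length_pos_iff.mpr (by rintro rfl; simp at hmem)
          simp [List.length_drop]; omega
        have hsub : ∀ x ∈ l.drop (j + 1), x ≤ m := fun x hx => hmax x (List.mem_of_mem_drop hx)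
        rw [ih (l.drop (j + 1)) m hlen hsub]
        rw [← recs_filter_drop l m j hmax hj]
        rw [recs_head_max hmem hmax]
        have hkeep : ((recs l).filter (fun x => decide (x ≠ m))).filter (fun x => decide (x ≠ highest))
            = (recs l).filter (fun x => decide (x ≠ m)) := by
          apply List.filter_eq_self.mpr
          intro x hx
          have hx1 := List.of_mem_filter hx
          have hx2 := hmax x (mem_recs (List.mem_of_mem_filter hx))
          have hmh := hub m hmem
          simp at hx1 ⊢; omega
        by_cases hmh : m = highest
        · subst hmh
          simp [hkeep]
        · simp only [List.filter_cons]
          simp only [show (decide (m ≠ highest)) = true by simp [hmh], if_true]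
          simp [hmh]
          apply List.filter_congr
          intro x hx
          have hx2 := hmax x (mem_recs hx)
          have h3 := hub m hmem
          by_cases hxm : x = m
          · simp [hxm]
          · simp [hxm, show ¬ (x = highest) by omega]

theorem see_joker_eq_recs (l : List Int) (hne : l ≠ []) : see_joker l = recs l := by
  unfold see_joker
  cases hm : PySem.List.max? l (fun y => y) with
  | none => exact absurd ((PySem.List.max?_eq_none_iff l _).mp hm) hne
  | some m =>
    have hmem : m ∈ l := PySem.List.max?_mem hm
    have hmax : ∀ x ∈ l, x ≤ m := fun x hx => PySem.List.max?_isMax hm x hx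
    cases hj : PySem.List.index? l m with
    | none => exact absurd (((PySem.List.index?_isSome_iff l m).mpr hmem)) (by rw [hj]; simp)
    | some j =>
      simp only [hj, Option.getD_some]
      rw [loop_eq_recs (l.drop (j + 1)).length (l.drop (j + 1)) m le_rfl
        (fun x hx => hmax x (List.mem_of_mem_drop hx))]
      rw [← recs_filter_drop l m j hmax hj]
      exact (recs_head_max hmem hmax).symm

-- ===== VERDICT (by name: the statement is the Claim_ definition above) =====
theorem see_joker_spec : Claim_equal_see_joker := by
  intro l _ hpre
  unfold Spec_see_joker
  rw [see_joker_eq_recs l hpre, alt_eq_recs]
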